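-- pv_equiv track=rewrite | github.com/zainulhassan815/hireflow | backend/app/services/query_parser.py | _skill_match
-- ===== SOURCE A (Python) =====
-- def _skill_match(text_lower: str, skill_lower: str) -> tuple[int, int] | None:
--     idx = 0
--     while True:
--         pos = text_lower.find(skill_lower, idx)
--         if pos == -1:
--             return None
--         left_ok = pos == 0 or not text_lower[pos - 1].isalnum()
--         end = pos + len(skill_lower)
--         right_ok = end == len(text_lower) or not text_lower[end].isalnum()
--         if left_ok and right_ok:
--             return (pos, end)
--         idx = pos + 1
-- ===== SOURCE B (Python) =====
-- def _skill_match(text_lower: str, skill_lower: str) -> tuple[int, int] | None: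
--     n = len(text_lower)
--     m = len(skill_lower)
--     prev_alnum = False
--     for i in range(n + 1):
--         if not prev_alnum and text_lower.startswith(skill_lower, i):
--             end = i + m
--             if end == n or not text_lower[end].isalnum():
--                 return (i, end)
--         if i < n:
--             prev_alnum = text_lower[i].isalnum()
--     return None
-- ===== Notes on version B (the rewrite author's own statement) =====
-- stated objective: alternative
-- what changed: Replaces A's repeated str.find-and-retry loop with a single left-to-right scan that tracks whether the previous character is alphanumeric and tests startswith plus the right boundary only at word-start positions.
import Mathlib
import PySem

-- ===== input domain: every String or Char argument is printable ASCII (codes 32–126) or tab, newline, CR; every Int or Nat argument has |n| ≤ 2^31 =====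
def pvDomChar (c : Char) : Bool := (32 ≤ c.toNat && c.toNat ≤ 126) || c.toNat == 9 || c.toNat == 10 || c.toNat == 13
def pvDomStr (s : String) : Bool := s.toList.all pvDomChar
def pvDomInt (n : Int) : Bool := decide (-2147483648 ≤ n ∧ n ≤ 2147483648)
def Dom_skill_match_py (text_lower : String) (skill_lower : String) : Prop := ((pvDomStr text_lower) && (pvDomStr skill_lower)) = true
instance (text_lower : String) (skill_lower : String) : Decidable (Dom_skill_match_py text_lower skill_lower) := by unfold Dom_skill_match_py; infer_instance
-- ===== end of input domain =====

-- B replaces A's find-and-retry loop by one left-to-right scan over word starts (alternative decomposition, same result).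

-- ===== PORT A =====
-- text_lower[i].isalnum() for a possibly negative Int index (Python wraparound via pyGet?; none cannot occur on the guarded uses)
def pvAlnumAt (t : List Char) (i : Int) : Bool :=
  match PySem.List.pyGet? t i with
  | some c => PySem.Chars.isalnum c
  | none => false

-- A's 'while True' loop; fuel only makes the recursion total (idx strictly increases and find fails past the length)
def pvALoop (t sk : List Char) : Nat → Nat → Option (Int × Int)
  | _, 0 => none
  | idx, fuel + 1 =>
    let pos := PySem.Chars.findFrom t sk (idx : Int) none
    if pos = -1 then none
    else
      let left_ok := pos == 0 || !pvAlnumAt t (pos - 1)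
      let e := pos + (sk.length : Int)
      let right_ok := e == (t.length : Int) || !pvAlnumAt t e
      if left_ok && right_ok then some (pos, e)
      else pvALoop t sk (pos.toNat + 1) fuel

def skill_match_py (text_lower : String) (skill_lower : String) : Option (Int × Int) :=
  pvALoop text_lower.toList skill_lower.toList 0 (text_lower.toList.length + 2)

-- ===== PORT B =====
-- B's single scan: at each i ≤ n, prev holds isalnum(text[i-1]) (False at i = 0)
def pvBLoop (t sk : List Char) (i : Nat) (prev : Bool) : Option (Int × Int) :=
  if i ≤ t.length then
    if (!prev && PySem.Chars.startswith (t.drop i) sk)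
        && (decide (i + sk.length = t.length) || !pvAlnumAt t ((i : Int) + (sk.length : Int))) then
      some ((i : Int), (i : Int) + (sk.length : Int))
    else pvBLoop t sk (i + 1) (pvAlnumAt t (i : Int))
  else none
termination_by t.length + 1 - i

def skill_match_py_alt (text_lower : String) (skill_lower : String) : Option (Int × Int) :=
  pvBLoop text_lower.toList skill_lower.toList 0 false

-- ===== PRECONDITION & SPEC =====
def Spec_skill_match_py (text_lower : String) (skill_lower : String) (out : Option (Int × Int)) : Prop := out = skill_match_py_alt text_lower skill_lower
instance (text_lower : String) (skill_lower : String) (out : Option (Int × Int)) : Decidable (Spec_skill_match_py text_lower skill_lower out) := by unfold Spec_skill_match_py; infer_instance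

-- ===== CLAIM (what is proved, stated in full; the proofs are below) =====
def Claim_equal_skill_match_py : Prop := ∀ (text_lower : String) (skill_lower : String), Dom_skill_match_py text_lower skill_lower → Spec_skill_match_py text_lower skill_lower (skill_match_py text_lower skill_lower)

-- ===== LEMMAS AND PROOFS =====

-- the accept condition at position i, as both loops test it
def pvP (t sk : List Char) (i : Nat) : Bool :=
  (!(decide (i ≠ 0) && pvAlnumAt t ((i : Int) - 1)) && PySem.Chars.startswith (t.drop i) sk)
    && (decide (i + sk.length = t.length) || !pvAlnumAt t ((i : Int) + (sk.length : Int)))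

def pvSpec (t sk : List Char) (i k : Nat) : Option (Int × Int) :=
  ((List.range' i k).find? (pvP t sk)).map (fun (j : Nat) => ((j : Int), (j : Int) + (sk.length : Int)))

theorem pvFindFrom_past (t sk : List Char) (k : Nat) (h : t.length < k) :
    PySem.Chars.findFrom t sk (k : Int) none = -1 := by
  simp only [PySem.Chars.findFrom]
  have h1 : ¬ ((k : Int) < 0) := by simp
  rw [if_neg h1]
  rw [if_pos (by exact_mod_cast h)]

theorem pvB_spec (t sk : List Char) : ∀ (k i : Nat) (prev : Bool), t.length + 1 - i ≤ k →
    prev = (decide (i ≠ 0) && pvAlnumAt t ((i : Int) - 1)) →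
    pvBLoop t sk i prev = pvSpec t sk i (t.length + 1 - i) := by
  intro k
  induction k with
  | zero =>
    intro i prev h hprev
    rw [pvBLoop, if_neg (by omega)]
    rw [pvSpec]
    have h0 : t.length + 1 - i = 0 := by omega
    rw [h0]
    rfl
  | succ k ih =>
    intro i prev h hprev
    by_cases hle : i ≤ t.length
    · rw [pvBLoop, if_pos hle]
      subst hprev
      by_cases hc : ((!(decide (i ≠ 0) && pvAlnumAt t ((i : Int) - 1)) && PySem.Chars.startswith (t.drop i) sk)
          && (decide (i + sk.length = t.length) || !pvAlnumAt t ((i : Int) + (sk.length : Int)))) = true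
      · rw [if_pos hc, pvSpec]
        have hk1 : t.length + 1 - i = (t.length - i) + 1 := by omega
        rw [hk1, List.range'_succ, List.find?_cons_of_pos (show pvP t sk i = true from hc)]
        rfl
      · rw [if_neg hc]
        rw [ih (i+1) (pvAlnumAt t (i : Int)) (by omega) (by push_cast; simp)]
        rw [pvSpec, pvSpec]
        have hk1 : t.length + 1 - i = (t.length + 1 - (i+1)) + 1 := by omega
        rw [hk1, List.range'_succ, List.find?_cons_of_neg (show ¬ pvP t sk i = true from hc)]
    · rw [pvBLoop, if_neg hle]
      rw [pvSpec]
      have h0 : t.length + 1 - i = 0 := by omega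
      rw [h0]
      rfl

-- an occurrence of sk at j ≥ idx is an infix of t.drop idx
theorem pvOcc_infix (t sk : List Char) (idx j : Nat) (hij : idx ≤ j) (h : sk <+: t.drop j) :
    sk <:+: t.drop idx := by
  have hsuf : t.drop j <:+ t.drop idx := by
    rw [show j = idx + (j - idx) by omega, ← List.drop_drop]
    exact List.drop_suffix _ _
  exact h.isInfix.trans hsuf.isInfix

theorem pvP_of_no_match (t sk : List Char) (j : Nat)
    (h : PySem.Chars.startswith (t.drop j) sk = false) : pvP t sk j = false := by
  simp [pvP, h]

theorem pvA_spec (t sk : List Char) (fuel : Nat) : ∀ (idx : Nat), idx ≤ t.length + 1 →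
    t.length + 2 - idx ≤ fuel →
    (∀ j < idx, pvP t sk j = false) →
    pvALoop t sk idx fuel = pvSpec t sk idx (t.length + 1 - idx) := by
  induction fuel with
  | zero => intro idx h1 h2 hinv; omega
  | succ fuel ih =>
    intro idx h1 h2 hinv
    by_cases hle : idx ≤ t.length
    · simp only [pvALoop]
      set pos := PySem.Chars.findFrom t sk (idx : Int) none with hposdef
      by_cases hneg : pos = -1
      · rw [if_pos hneg]
        have hno : ¬ sk <:+: t.drop idx :=
          (PySem.Chars.findFrom_natCast_eq_neg_one_iff t sk idx hle).mp hneg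
        symm
        rw [pvSpec, Option.map_eq_none_iff]
        apply List.find?_eq_none.mpr
        intro j hj
        rw [List.mem_range'_1] at hj
        have hsw : PySem.Chars.startswith (t.drop j) sk = false := by
          by_contra hx
          have hpre : sk <+: t.drop j :=
            (PySem.Chars.startswith_iff _ _).mp (Bool.not_eq_false _ |>.mp hx)
          exact hno (pvOcc_infix t sk idx j hj.1 hpre)
        simp [pvP_of_no_match t sk j hsw]
      · rw [if_neg hneg]
        obtain ⟨hge, hpre, hmin⟩ := PySem.Chars.findFrom_natCast_spec t sk idx hle hneg
        rw [← hposdef] at hge hpre hmin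
        have h0 : (0 : Int) ≤ pos := le_trans (Int.natCast_nonneg idx) hge
        set p := pos.toNat with hpdef
        have hposp : (p : Int) = pos := Int.toNat_of_nonneg h0
        have hidxp : idx ≤ p := by omega
        have hplen : p ≤ t.length := by
          by_contra hgt0
          have hgt : t.length < p := by omega
          have hdrop : t.drop p = [] := List.drop_eq_nil_of_le (by omega)
          have hsknil : sk = [] := List.prefix_nil.mp (hdrop ▸ hpre)
          exact hmin idx le_rfl (by omega) (hsknil ▸ List.nil_prefix)
        have hsw : PySem.Chars.startswith (t.drop p) sk = true :=
          (PySem.Chars.startswith_iff _ _).mpr hpre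
        have hcast : ((p : Int) + (sk.length : Int) == (t.length : Int))
            = decide (p + sk.length = t.length) := by
          by_cases hq : p + sk.length = t.length
          · have hq2 : (p : Int) + (sk.length : Int) = (t.length : Int) := by exact_mod_cast hq
            simp [hq, hq2]
          · have hq' : ¬((p : Int) + (sk.length : Int) = (t.length : Int)) := by exact_mod_cast hq
            simp [hq, hq']
        have hcond : ((pos == 0 || !pvAlnumAt t (pos - 1))
            && (pos + (sk.length : Int) == (t.length : Int) || !pvAlnumAt t (pos + (sk.length : Int))))
            = pvP t sk p := by
          rw [← hposp]
          simp only [pvP, hsw, Bool.and_true, hcast]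
          by_cases hz : p = 0
          · simp [hz]
          · have hz' : ((p : Int) == 0) = false := by
              simp
              exact hz
            simp [hz, hz']
        have hfail : ∀ j, idx ≤ j → j < p → pvP t sk j = false := by
          intro j hj1 hj2
          apply pvP_of_no_match
          by_contra hx
          exact hmin j hj1 hj2
            ((PySem.Chars.startswith_iff _ _).mp (Bool.not_eq_false _ |>.mp hx))
        have hsplit : List.range' idx (t.length + 1 - idx)
            = List.range' idx (p - idx) ++ List.range' p (t.length + 1 - p) := by
          have hap := List.range'_append (s := idx) (m := p - idx) (n := t.length + 1 - p) (step := 1)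
          rw [show idx + 1 * (p - idx) = p by omega] at hap
          rw [show t.length + 1 - idx = (p - idx) + (t.length + 1 - p) by omega, ← hap]
        have hfind1 : (List.range' idx (p - idx)).find? (pvP t sk) = none := by
          apply List.find?_eq_none.mpr
          intro j hj
          rw [List.mem_range'_1] at hj
          simp [hfail j hj.1 (by omega)]
        rw [pvSpec, hsplit, List.find?_append, hfind1, Option.none_or,
            show t.length + 1 - p = (t.length - p) + 1 by omega, List.range'_succ,
            List.find?_cons, hcond]
        by_cases hcb : pvP t sk p = true
        · rw [if_pos hcb]
          simp only [hcb]
          rw [← hposp]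
          simp
        · rw [if_neg hcb]
          have hcbf : pvP t sk p = false := by simpa using hcb
          simp only [hcbf]
          rw [ih (p + 1) (by omega) (by omega) ?_]
          · rw [pvSpec, show t.length + 1 - (p + 1) = t.length - p by omega]
          · intro j hj
            rcases Nat.lt_or_ge j idx with hlt | hge2
            · exact hinv j hlt
            · rcases Nat.lt_or_ge j p with hlt2 | hge3
              · exact hfail j hge2 hlt2
              · have hjp : j = p := by omega
                rw [hjp]
                exact hcbf
    · have hidx1 : idx = t.length + 1 := by omega
      simp only [pvALoop]
      rw [if_pos (by rw [hidx1]; exact pvFindFrom_past t sk _ (by omega))]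
      rw [pvSpec, show t.length + 1 - idx = 0 by omega]
      rfl

-- ===== VERDICT (by name: the statement is the Claim_ definition above) =====
theorem skill_match_py_spec : Claim_equal_skill_match_py := by
  intro t sk _
  unfold Spec_skill_match_py skill_match_py skill_match_py_alt
  rw [pvA_spec _ _ _ 0 (by omega) (by omega) (by omega),
      pvB_spec _ _ (t.toList.length + 1) 0 false (by omega) (by simp)]
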